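-- pv_equiv track=rewrite | github.com/pypi-data/pypi-mirror-181 | packages/jnpython/jnpython-0.1.0-py3-none-any.whl/jnpython/int_helper.py | count_fractions_sb
-- ===== SOURCE A (Python) =====
-- def count_fractions_sb(denominator_limit, left, right):
--     c = 0
--     top = 0
--     stack = [x for x in range(0, denominator_limit//2)]
--     while True:
--         med = left + right
--         if med > denominator_limit:
--             if top > 0:
--                 left = right
--                 top -=1
--                 right = stack[top]
--             else:
--                 break
--         else:
--             c+=1
--             stack[top] = right
--             top +=1
--             right = med
--     return c
-- ===== SOURCE B (Python) =====
-- def count_fractions_sb(denominator_limit, left, right):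
--     # Stern-Brocot descent over an agenda of pending states, with each whole
--     # mediant run counted in closed form: from a state (a, b) the consecutive
--     # mediants are b+a, b+2a, ... and exactly (N - b) // a of them stay within
--     # the limit; count the run at once and queue each run element's right branch.
--     N = denominator_limit
--     total = 0
--     pending = [(left, right)]
--     while pending:
--         a, b = pending.pop()
--         if a + b > N or a <= 0 or b <= 0:
--             # no mediant in range (or a degenerate state the descent never
--             # reaches from a positive start)
--             continue
--         k = (N - b) // a
--         total += k
--         for j in range(1, k + 1):
--             pending.append((b + j * a, b + (j - 1) * a))
--     return total
-- ===== Notes on version B (the rewrite author's own statement) =====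
-- stated objective: faster
-- what changed: A walks the Stern-Brocot tree one mediant per iteration with a hand-managed preallocated stack array of size N//2 and a top pointer; B keeps an agenda of pending (a,b) states and counts each whole mediant run in closed form ((N-b)//a), queueing only the run elements' right branches, with no preallocated array.
import Mathlib
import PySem

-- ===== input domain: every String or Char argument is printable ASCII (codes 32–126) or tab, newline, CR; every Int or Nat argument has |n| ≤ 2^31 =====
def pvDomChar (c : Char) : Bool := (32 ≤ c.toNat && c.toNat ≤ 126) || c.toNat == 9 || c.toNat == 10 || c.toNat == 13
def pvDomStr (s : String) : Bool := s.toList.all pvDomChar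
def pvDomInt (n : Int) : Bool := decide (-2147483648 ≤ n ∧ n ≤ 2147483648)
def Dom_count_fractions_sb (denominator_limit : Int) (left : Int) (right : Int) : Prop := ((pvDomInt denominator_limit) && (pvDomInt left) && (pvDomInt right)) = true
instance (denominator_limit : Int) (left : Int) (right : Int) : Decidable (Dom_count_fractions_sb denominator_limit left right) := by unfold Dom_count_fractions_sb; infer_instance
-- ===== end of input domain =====

-- B replaces A's node-by-node tree walk over a hand-managed fixed-size stack array by a
-- recursive Stern-Brocot descent that counts each whole mediant run in closed form
-- ((N - b) // a) and recurses only into the run elements' right branches (alternative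
-- decomposition, no stack array; same asymptotic cost).


-- ===== PORT A =====
-- The 'while True' loop becomes a fuel-counted recursion; the fuel (chosen ≥ the exact
-- number of loop iterations on every input admitted by Pre_, see sbG_le_bound below) is
-- only a decreasing counter, every state change is Python's.  'stack[top] = right' with
-- top == len(stack) raises IndexError in Python: that branch returns the junk value c and
-- is excluded by Pre_.  The read 'stack[top]' after 'top -= 1' is always in range
-- (0 ≤ top < len is an invariant of the loop), so getD is exact there.
def sbLoop (N : Int) : Nat → Int → Nat → List Int → Int → Int → Int
  | 0, c, _, _, _, _ => c                                   -- fuel exhausted: unreachable under Pre_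
  | fuel+1, c, top, stack, left, right =>
    if left + right > N then
      if 0 < top then
        sbLoop N fuel c (top-1) stack right (stack.getD (top-1) 0)
      else c
    else
      if top < stack.length then
        sbLoop N fuel (c+1) (top+1) (stack.set top right) left (left+right)
      else c                                                -- IndexError: excluded by Pre_

def count_fractions_sb (denominator_limit : Int) (left : Int) (right : Int) : Int :=
  sbLoop denominator_limit
    (2 * ((denominator_limit + 2) * (denominator_limit + 2)).toNat + 1)
    0 0 (PySem.List.pyRange 0 (PySem.Int.floordiv denominator_limit 2) 1) left right

-- ===== PORT B =====
-- transliteration of Source B: an agenda (Python list used as a stack) of pending states;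
-- each popped state counts its whole mediant run in closed form and queues the run
-- elements' right branches.  The HEAD of this list is the END of the Python list (the
-- pop/append site), so Python's 'append j = 1..k then pop from the end' is 'reverse ++'.
-- The 'while pending' loop becomes a fuel-counted recursion; the fuel is only a
-- decreasing counter (chosen ≥ the number of iterations on every input, see sbAgenda_eq).
def sbAgenda (N : Int) : Nat → Int → List (Int × Int) → Int
  | 0, total, _ => total                                  -- fuel exhausted: unreachable
  | _+1, total, [] => total
  | fuel+1, total, (a, b) :: rest =>
    if a + b > N ∨ a ≤ 0 ∨ b ≤ 0 then sbAgenda N fuel total rest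
    else
      let k := PySem.Int.floordiv (N - b) a
      sbAgenda N fuel (total + k)
        (((PySem.List.pyRange 1 (k + 1) 1).map (fun j => (b + j * a, b + (j - 1) * a))).reverse
          ++ rest)

def count_fractions_sb_alt (denominator_limit : Int) (left : Int) (right : Int) : Int :=
  sbAgenda denominator_limit
    (2 * ((denominator_limit + 2) * (denominator_limit + 2)).toNat + 2)
    0 [(left, right)]

-- ===== PRECONDITION & SPEC =====
-- Pre_ is exactly the set of inputs on which the Python A returns: either the very first
-- mediant already exceeds the limit (immediate break, result 0), or both denominators are
-- positive and the deepest left-descent of the walk, 1 + (N-l-r)//l entries, fits into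
-- A's preallocated stack of size N//2; everywhere else A raises IndexError.
def Pre_count_fractions_sb (denominator_limit : Int) (left : Int) (right : Int) : Prop :=
  denominator_limit < left + right ∨
    (1 ≤ left ∧ 1 ≤ right ∧
      PySem.Int.floordiv (denominator_limit - left - right) left + 1 ≤
        PySem.Int.floordiv denominator_limit 2)
instance (denominator_limit : Int) (left : Int) (right : Int) : Decidable (Pre_count_fractions_sb denominator_limit left right) := by unfold Pre_count_fractions_sb; infer_instance

def pvWitness_count_fractions_sb : Int × Int × Int := (10, 3, 4)

def Spec_count_fractions_sb (denominator_limit : Int) (left : Int) (right : Int) (out : Int) : Prop := out = count_fractions_sb_alt denominator_limit left right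
instance (denominator_limit : Int) (left : Int) (right : Int) (out : Int) : Decidable (Spec_count_fractions_sb denominator_limit left right out) := by unfold Spec_count_fractions_sb; infer_instance

-- ===== CLAIM (what is proved, stated in full; the proofs are below) =====
def Claim_equal_count_fractions_sb : Prop := ∀ (denominator_limit : Int) (left : Int) (right : Int), Dom_count_fractions_sb denominator_limit left right → Pre_count_fractions_sb denominator_limit left right → Spec_count_fractions_sb denominator_limit left right (count_fractions_sb denominator_limit left right)


-- ===== LEMMAS AND PROOFS =====

-- the plain (un-batched) Stern-Brocot subtree count; the bridge between the two ports
def sbG (N : Int) (a : Int) (b : Int) : Int :=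
  if a + b > N ∨ a ≤ 0 ∨ b ≤ 0 then 0
  else 1 + sbG N a (a + b) + sbG N (a + b) b
termination_by (N + 1 - (a + b)).toNat
decreasing_by
  · rename_i h; push_neg at h; omega
  · rename_i h; push_neg at h; omega

lemma sbG_zero (N a b : Int) (h : a + b > N ∨ a ≤ 0 ∨ b ≤ 0) : sbG N a b = 0 := by
  rw [sbG, if_pos h]

lemma sbG_pos_unfold (N a b : Int) (ha : 1 ≤ a) (hb : 1 ≤ b) (hab : a + b ≤ N) :
    sbG N a b = 1 + sbG N a (a + b) + sbG N (a + b) b := by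
  rw [sbG, if_neg (by omega : ¬(a + b > N ∨ a ≤ 0 ∨ b ≤ 0))]

lemma sbG_nonneg (N : Int) : ∀ (n : Nat) (a b : Int), (N + 1 - (a + b)).toNat ≤ n → 0 ≤ sbG N a b := by
  intro n
  induction n with
  | zero =>
    intro a b hm
    rw [sbG]
    split
    · omega
    · rename_i hg; push_neg at hg; omega
  | succ n ih =>
    intro a b hm
    rw [sbG]
    split
    · omega
    · rename_i hg
      push_neg at hg
      obtain ⟨h1, h2, h3⟩ := hg
      have i1 := ih a (a + b) (by omega)
      have i2 := ih (a + b) b (by omega)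
      omega

lemma sbG_nonneg' (N a b : Int) : 0 ≤ sbG N a b := sbG_nonneg N _ a b le_rfl

-- fuel bound: a*b*(count+1) ≤ (N+2)^2
lemma sbG_le_bound (N : Int) : ∀ (n : Nat) (a b : Int), (N + 1 - (a + b)).toNat ≤ n →
    1 ≤ a → 1 ≤ b → a + b ≤ N →
    a * b * (sbG N a b + 1) ≤ (N + 2) * (N + 2) := by
  intro n
  induction n with
  | zero => intro a b hm ha hb hab; exfalso; omega
  | succ n ih =>
    intro a b hm ha hb hab
    rw [sbG_pos_unfold N a b ha hb hab]
    have hN2 : 2 ≤ N := by omega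
    have hL : a * (a + b) * (sbG N a (a + b) + 1) ≤ (N + 2) * (N + 2) := by
      by_cases h2 : a + (a + b) ≤ N
      · exact ih a (a + b) (by omega) ha (by omega) h2
      · rw [sbG_zero N a (a + b) (Or.inl (by omega))]
        have hA : a ≤ N := by omega
        have hAB : a + b ≤ N := hab
        have := mul_le_mul hA hAB (by omega) (by omega)
        nlinarith
    have hR : (a + b) * b * (sbG N (a + b) b + 1) ≤ (N + 2) * (N + 2) := by
      by_cases h2 : (a + b) + b ≤ N
      · exact ih (a + b) b (by omega) (by omega) hb h2
      · rw [sbG_zero N (a + b) b (Or.inl (by omega))]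
        have hA : a + b ≤ N := hab
        have hB : b ≤ N := by omega
        have := mul_le_mul hA hB (by omega) (by omega)
        nlinarith
    have hbK := mul_le_mul_of_nonneg_left hL (show (0:Int) ≤ b by omega)
    have haK := mul_le_mul_of_nonneg_left hR (show (0:Int) ≤ a by omega)
    have hsum : (a + b) * (a * b * ((1 + sbG N a (a + b) + sbG N (a + b) b) + 1))
        ≤ (a + b) * ((N + 2) * (N + 2)) := by
      calc (a + b) * (a * b * ((1 + sbG N a (a + b) + sbG N (a + b) b) + 1))
          = b * (a * (a + b) * (sbG N a (a + b) + 1)) + a * ((a + b) * b * (sbG N (a + b) b + 1)) := by ring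
        _ ≤ b * ((N + 2) * (N + 2)) + a * ((N + 2) * (N + 2)) := add_le_add hbK haK
        _ = (a + b) * ((N + 2) * (N + 2)) := by ring
    exact le_of_mul_le_mul_left hsum (by omega)

-- floor division shifts by one when the numerator drops by the divisor
lemma ediv_sub_self_div (x a : Int) (ha : 0 < a) : (x - a) / a = x / a - 1 := by
  have h := Int.add_mul_ediv_right x (-1) (by omega : a ≠ 0)
  have hx : x - a = x + (-1) * a := by ring
  rw [hx, h]
  ring

lemma ediv_le_ediv_of_den_le (x c d : Int) (hx : 0 ≤ x) (hc : 0 < c) (hcd : c ≤ d) :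
    x / d ≤ x / c := by
  rw [Int.le_ediv_iff_mul_le hc]
  have hd : 0 < d := lt_of_lt_of_le hc hcd
  have h0 : 0 ≤ x / d := Int.ediv_nonneg hx (le_of_lt hd)
  have h1 : x / d * c ≤ x / d * d := mul_le_mul_of_nonneg_left hcd h0
  have h2 : x / d * d ≤ x := by
    have h3 := Int.ediv_add_emod x d
    have h4 := Int.emod_nonneg x (by omega : d ≠ 0)
    nlinarith
  linarith

-- unrolling the left-descent chain: the whole run of k = (N-b)//a mediants at once
lemma sbG_batch (N : Int) : ∀ (n : Nat) (a b : Int), (N + 1 - (a + b)).toNat ≤ n →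
    1 ≤ a → 1 ≤ b → a + b ≤ N →
    (PySem.List.pyRange 1 (PySem.Int.floordiv (N - b) a + 1) 1).foldl
        (fun acc j => acc + sbG N (b + j * a) (b + (j - 1) * a))
        (PySem.Int.floordiv (N - b) a)
      = sbG N a b := by
  intro n
  induction n with
  | zero => intro a b hm ha hb hab; exfalso; omega
  | succ n ih =>
    intro a b hm ha hb hab
    have ha0 : 0 < a := by omega
    have hkdiv : PySem.Int.floordiv (N - b) a = (N - b) / a :=
      PySem.Int.floordiv_eq_ediv_of_pos ha0
    have hk1 : 1 ≤ (N - b) / a := by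
      rw [← hkdiv, PySem.Int.le_floordiv_iff_mul_le ha0]; omega
    have e1' : b + 1 * a = a + b := by ring
    have e0' : b + (1 - 1) * a = b := by ring
    rw [hkdiv, PySem.List.foldl_add, sbG_pos_unfold N a b ha hb hab]
    by_cases h2 : a + (a + b) ≤ N
    · -- the run has at least two elements; peel the first and reindex the rest
      have ihL := ih a (a + b) (by omega) ha (by omega) h2
      have hk'div : PySem.Int.floordiv (N - (a + b)) a = (N - (a + b)) / a :=
        PySem.Int.floordiv_eq_ediv_of_pos ha0
      have hshiftdiv : (N - (a + b)) / a = (N - b) / a - 1 := by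
        have e : N - (a + b) = (N - b) - a := by ring
        rw [e, ediv_sub_self_div (N - b) a ha0]
      rw [PySem.List.foldl_add, hk'div, hshiftdiv] at ihL
      have hcons := PySem.List.pyRange_one_cons (show (1:Int) < (N - b) / a + 1 by omega)
      norm_num at hcons
      rw [hcons]
      have hshift : (PySem.List.pyRange 2 ((N - b) / a + 1) 1).map
            (fun j => sbG N (b + j * a) (b + (j - 1) * a))
          = (PySem.List.pyRange 1 (((N - b) / a - 1) + 1) 1).map
            (fun j => sbG N ((a + b) + j * a) ((a + b) + (j - 1) * a)) := by
        have d1 : (((N - b) / a + 1) - 2 : Int) = (N - b) / a - 1 := by ring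
        have d2 : ((((N - b) / a - 1) + 1) - 1 : Int) = (N - b) / a - 1 := by ring
        rw [PySem.List.pyRange_one 2 ((N - b) / a + 1),
          PySem.List.pyRange_one 1 (((N - b) / a - 1) + 1), d1, d2]
        rw [List.map_map, List.map_map]
        apply List.map_congr_left
        intro t ht
        show sbG N (b + (2 + (t:Int)) * a) (b + ((2 + (t:Int)) - 1) * a)
            = sbG N ((a + b) + (1 + (t:Int)) * a) ((a + b) + ((1 + (t:Int)) - 1) * a)
        have ex : b + (2 + (t:Int)) * a = (a + b) + (1 + (t:Int)) * a := by ring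
        have ey : b + ((2 + (t:Int)) - 1) * a = (a + b) + ((1 + (t:Int)) - 1) * a := by ring
        rw [ex, ey]
      simp only [List.map_cons, List.sum_cons]
      rw [hshift, e1', e0']
      omega
    · -- the run is a single mediant: k = 1 and the left subtree is empty
      have hkeq : (N - b) / a = 1 := by
        rw [← hkdiv, PySem.Int.floordiv_eq_iff_of_pos ha0]
        constructor <;> nlinarith
      rw [hkeq, sbG_zero N a (a + b) (Or.inl (by omega)), PySem.List.pyRange_one_singleton]
      simp only [List.map_cons, List.map_nil, List.sum_cons, List.sum_nil]
      rw [e1', e0']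
      omega

-- the subtree count never exceeds the square fuel budget
lemma sbG_lt_bound (N a b : Int) : sbG N a b ≤ (N + 2) * (N + 2) := by
  by_cases hg : a + b > N ∨ a ≤ 0 ∨ b ≤ 0
  · rw [sbG_zero N a b hg]; exact mul_self_nonneg _
  · have ha : 1 ≤ a := by omega
    have hb : 1 ≤ b := by omega
    have hab : a + b ≤ N := by omega
    have hbound := sbG_le_bound N _ a b le_rfl ha hb hab
    have hab1 : (1:Int) ≤ a * b := by nlinarith
    have h2 : sbG N a b + 1 ≤ a * b * (sbG N a b + 1) :=
      le_mul_of_one_le_left (by have := sbG_nonneg' N a b; omega) hab1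
    linarith

-- B computes total plus the subtree counts of all pending states
lemma sbAgenda_eq (N : Int) : ∀ (fuel : Nat) (total : Int) (pending : List (Int × Int)),
    (pending.map (fun p => 2 * sbG N p.1 p.2 + 1)).sum + 1 ≤ (fuel : Int) →
    sbAgenda N fuel total pending = total + (pending.map (fun p => sbG N p.1 p.2)).sum := by
  intro fuel
  induction fuel with
  | zero =>
    intro total pending h
    exfalso
    have hnn : 0 ≤ (pending.map (fun p => 2 * sbG N p.1 p.2 + 1)).sum := by
      apply List.sum_nonneg
      intro x hx
      obtain ⟨p, hp, rfl⟩ := List.mem_map.mp hx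
      have := sbG_nonneg' N p.1 p.2
      omega
    push_cast at h
    omega
  | succ fuel ih =>
    intro total pending h
    cases pending with
    | nil => simp [sbAgenda]
    | cons p rest =>
      obtain ⟨a, b⟩ := p
      simp only [List.map_cons, List.sum_cons] at h ⊢
      by_cases hg : a + b > N ∨ a ≤ 0 ∨ b ≤ 0
      · have hg0 : sbG N a b = 0 := sbG_zero N a b hg
        rw [hg0] at h ⊢
        simp only [sbAgenda]
        rw [if_pos hg, ih total rest (by push_cast at h ⊢; omega)]
        omega
      · have ha : 1 ≤ a := by omega
        have hb : 1 ≤ b := by omega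
        have hab : a + b ≤ N := by omega
        have ha0 : 0 < a := by omega
        have hkdiv : PySem.Int.floordiv (N - b) a = (N - b) / a :=
          PySem.Int.floordiv_eq_ediv_of_pos ha0
        have hk1 : 1 ≤ (N - b) / a := by
          rw [← hkdiv, PySem.Int.le_floordiv_iff_mul_le ha0]; omega
        -- the run identity, as "k + sum of right-branch counts = subtree count"
        have hbatch := sbG_batch N ((N + 1 - (a + b)).toNat) a b le_rfl ha hb hab
        rw [PySem.List.foldl_add, hkdiv] at hbatch
        have hgunf : sbG N a b = (N - b) / a
            + ((PySem.List.pyRange 1 ((N - b) / a + 1) 1).map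
                (fun j => sbG N (b + j * a) (b + (j - 1) * a))).sum := hbatch.symm
        simp only [sbAgenda]
        rw [if_neg hg]
        show sbAgenda N fuel (total + PySem.Int.floordiv (N - b) a)
            (((PySem.List.pyRange 1 (PySem.Int.floordiv (N - b) a + 1) 1).map
                (fun j => (b + j * a, b + (j - 1) * a))).reverse ++ rest)
          = total + (sbG N a b + (rest.map (fun p => sbG N p.1 p.2)).sum)
        rw [hkdiv]
        have hlenk : (((PySem.List.pyRange 1 ((N - b) / a + 1) 1).length : Nat) : Int)
            = (N - b) / a := by
          rw [PySem.List.length_pyRange_one]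
          omega
        -- sums over the queued children, with the pair projections folded away
        have hcg : ((((PySem.List.pyRange 1 ((N - b) / a + 1) 1).map
              (fun j => (b + j * a, b + (j - 1) * a))).reverse).map
                (fun p => sbG N p.1 p.2)).sum
            = ((PySem.List.pyRange 1 ((N - b) / a + 1) 1).map
                (fun j => sbG N (b + j * a) (b + (j - 1) * a))).sum := by
          rw [List.map_reverse, List.sum_reverse, List.map_map]
          rfl
        have hcc : ((((PySem.List.pyRange 1 ((N - b) / a + 1) 1).map
              (fun j => (b + j * a, b + (j - 1) * a))).reverse).map
                (fun p => 2 * sbG N p.1 p.2 + 1)).sum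
            = ((PySem.List.pyRange 1 ((N - b) / a + 1) 1).map
                (fun j => 2 * sbG N (b + j * a) (b + (j - 1) * a) + 1)).sum := by
          rw [List.map_reverse, List.sum_reverse, List.map_map]
          rfl
        have hsum2 : ((PySem.List.pyRange 1 ((N - b) / a + 1) 1).map
              (fun j => 2 * sbG N (b + j * a) (b + (j - 1) * a) + 1)).sum
            = 2 * ((PySem.List.pyRange 1 ((N - b) / a + 1) 1).map
                (fun j => sbG N (b + j * a) (b + (j - 1) * a))).sum
              + (((PySem.List.pyRange 1 ((N - b) / a + 1) 1).length : Nat) : Int) := by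
          rw [PySem.List.sum_map_add_int]
          rw [List.sum_map_mul_left]
          rw [PySem.List.sum_map_const_int]
          ring
        rw [ih (total + (N - b) / a) _ ?_]
        · rw [List.map_append, List.sum_append, hcg]
          omega
        · rw [List.map_append, List.sum_append, hcc, hsum2, hlenk]
          push_cast at h ⊢
          omega

-- B's top level computes the plain subtree count of its argument
lemma alt_eq_sbG (N l r : Int) : count_fractions_sb_alt N l r = sbG N l r := by
  unfold count_fractions_sb_alt
  rw [sbAgenda_eq N _ 0 [(l, r)] ?_]
  · simp only [List.map_cons, List.map_nil, List.sum_cons, List.sum_nil]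
    omega
  · simp only [List.map_cons, List.map_nil, List.sum_cons, List.sum_nil]
    have h1 := sbG_lt_bound N l r
    have h2 := sbG_nonneg' N l r
    have h3 : (0:Int) ≤ (N + 2) * (N + 2) := mul_self_nonneg _
    push_cast
    omega

-- the machine explores the subtree rooted at (a,b), adds sbG N a b to c, and pops out
lemma sbLoop_fail_step (N a b : Int) (hfail : a + b > N) (fuel : Nat) (c : Int)
    (top : Nat) (stack : List Int) :
    ∃ stack' : List Int, stack'.length = stack.length ∧
      (∀ i : Nat, i < top → stack'.getD i 0 = stack.getD i 0) ∧
      sbLoop N (fuel + (2 * (sbG N a b).toNat + 1)) c top stack a b =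
        (if top = 0 then c + sbG N a b
         else sbLoop N fuel (c + sbG N a b) (top - 1) stack' b (stack'.getD (top - 1) 0)) := by
  have hg0 : sbG N a b = 0 := sbG_zero N a b (Or.inl hfail)
  refine ⟨stack, rfl, fun i _ => rfl, ?_⟩
  have hfe : fuel + (2 * (sbG N a b).toNat + 1) = fuel + 1 := by rw [hg0]; rfl
  rw [hfe]
  simp only [sbLoop]
  rw [if_pos hfail, hg0, add_zero]
  by_cases ht0 : top = 0
  · rw [if_neg (by omega : ¬ 0 < top), if_pos ht0]
  · rw [if_pos (by omega : 0 < top), if_neg ht0]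

lemma sbLoop_explore (N : Int) : ∀ (n : Nat) (a b : Int), (N + 1 - (a + b)).toNat ≤ n →
    1 ≤ a → 1 ≤ b →
    ∀ (fuel : Nat) (c : Int) (top : Nat) (stack : List Int),
      top ≤ stack.length →
      (a + b ≤ N → (top : Int) + 1 + (N - a - b) / a ≤ (stack.length : Int)) →
      ∃ stack' : List Int, stack'.length = stack.length ∧
        (∀ i : Nat, i < top → stack'.getD i 0 = stack.getD i 0) ∧
        sbLoop N (fuel + (2 * (sbG N a b).toNat + 1)) c top stack a b =
          (if top = 0 then c + sbG N a b
           else sbLoop N fuel (c + sbG N a b) (top - 1) stack' b (stack'.getD (top - 1) 0)) := by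
  intro n
  induction n with
  | zero =>
    intro a b hm ha hb fuel c top stack htop hcap
    by_cases hfail : a + b > N
    · exact sbLoop_fail_step N a b hfail fuel c top stack
    · exfalso; omega
  | succ n ih =>
    intro a b hm ha hb fuel c top stack htop hcap
    by_cases hfail : a + b > N
    · exact sbLoop_fail_step N a b hfail fuel c top stack
    · -- push the node, explore the left subtree, then the right one
      have hab : a + b ≤ N := by omega
      have hdnn : 0 ≤ (N - a - b) / a := Int.ediv_nonneg (by omega) (by omega)
      have hlen : top < stack.length := by
        have := hcap hab
        omega
      have hgL := sbG_nonneg' N a (a + b)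
      have hgR := sbG_nonneg' N (a + b) b
      have hgeq : sbG N a b = 1 + sbG N a (a + b) + sbG N (a + b) b :=
        sbG_pos_unfold N a b ha hb hab
      have hfe : fuel + (2 * (sbG N a b).toNat + 1)
          = ((fuel + (2 * (sbG N (a + b) b).toNat + 1)) + (2 * (sbG N a (a + b)).toNat + 1)) + 1 := by
        omega
      set M : Nat := (fuel + (2 * (sbG N (a + b) b).toNat + 1)) + (2 * (sbG N a (a + b)).toNat + 1) with hM
      rw [hfe]
      simp only [sbLoop]
      rw [if_neg hfail, if_pos hlen, hM]
      -- left subtree at level top+1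
      obtain ⟨st1, hlen1, hagree1, heq1⟩ := ih a (a + b) (by omega) ha (by omega)
        (fuel + (2 * (sbG N (a + b) b).toNat + 1)) (c + 1) (top + 1) (stack.set top b)
        (by rw [List.length_set]; omega)
        (by
          intro h2
          rw [List.length_set]
          have hsh : (N - a - (a + b)) / a = (N - a - b) / a - 1 := by
            have e : N - a - (a + b) = (N - a - b) - a := by ring
            rw [e, ediv_sub_self_div (N - a - b) a (by omega)]
          have := hcap hab
          omega)
      rw [heq1, if_neg (by omega : ¬(top + 1 = 0))]
      have ht1 : top + 1 - 1 = top := by omega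
      rw [ht1]
      have hst1top : st1.getD top 0 = b := by
        rw [hagree1 top (by omega)]
        rw [List.getD_eq_getElem?_getD, List.getElem?_set_self (by omega), Option.getD_some]
      rw [hst1top]
      -- right subtree at level top
      obtain ⟨st2, hlen2, hagree2, heq2⟩ := ih (a + b) b (by omega) (by omega) hb
        fuel (c + 1 + sbG N a (a + b)) top st1
        (by rw [hlen1, List.length_set]; omega)
        (by
          intro h2
          have hnum : 0 ≤ N - (a + b) - b := by omega
          have hmono1 : (N - (a + b) - b) / (a + b) ≤ (N - (a + b) - b) / a :=
            ediv_le_ediv_of_den_le (N - (a + b) - b) a (a + b) hnum (by omega) (by omega)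
          have hmono2 : (N - (a + b) - b) / a ≤ (N - a - b) / a :=
            Int.ediv_le_ediv (by omega) (by omega)
          have := hcap hab
          have hl1 : (st1.length : Int) = (stack.length : Int) := by
            rw [hlen1, List.length_set]
          omega)
      rw [heq2]
      refine ⟨st2, by rw [hlen2, hlen1, List.length_set], ?_, ?_⟩
      · intro i hi
        rw [hagree2 i hi, hagree1 i (by omega)]
        rw [List.getD_eq_getElem?_getD, List.getD_eq_getElem?_getD,
          List.getElem?_set_ne (by omega)]
      · have hc : c + 1 + sbG N a (a + b) + sbG N (a + b) b = c + sbG N a b := by omega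
        rw [hc]

-- ===== VERDICT (by name: the statement is the Claim_ definition above) =====
theorem count_fractions_sb_spec : Claim_equal_count_fractions_sb := by
  intro N l r hdom hpre
  unfold Spec_count_fractions_sb count_fractions_sb
  rw [alt_eq_sbG]
  by_cases hlr : N < l + r
  · -- first mediant already over the limit: both sides are 0
    rw [sbG_zero N l r (Or.inl hlr)]
    simp only [sbLoop]
    rw [if_pos hlr, if_neg (by omega : ¬ 0 < 0)]
  · obtain ⟨hl, hr, hcap⟩ := hpre.resolve_left hlr
    have hab : l + r ≤ N := by omega
    have hN2 : 2 ≤ N := by omega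
    have hlen : ((PySem.List.pyRange 0 (PySem.Int.floordiv N 2) 1).length : Int) = N / 2 := by
      rw [PySem.List.length_pyRange_one]
      rw [PySem.Int.floordiv_eq_ediv_of_pos (by omega : (0:Int) < 2)]
      have h0 : (0:Int) ≤ N / 2 := Int.ediv_nonneg (by omega) (by omega)
      omega
    have hcap' : (0 : Int) + 1 + (N - l - r) / l ≤ ((PySem.List.pyRange 0 (PySem.Int.floordiv N 2) 1).length : Int) := by
      rw [hlen]
      rw [PySem.Int.floordiv_eq_ediv_of_pos (by omega : (0:Int) < l),
        PySem.Int.floordiv_eq_ediv_of_pos (by omega : (0:Int) < 2)] at hcap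
      omega
    have hg1 : sbG N l r ≤ (N + 2) * (N + 2) := sbG_lt_bound N l r
    have hg0 := sbG_nonneg' N l r
    have hfuel : 2 * ((N + 2) * (N + 2)).toNat + 1
        = (2 * ((N + 2) * (N + 2)).toNat - 2 * (sbG N l r).toNat) + (2 * (sbG N l r).toNat + 1) := by
      omega
    rw [hfuel]
    obtain ⟨st, _, _, heq⟩ := sbLoop_explore N _ l r le_rfl hl hr
      (2 * ((N + 2) * (N + 2)).toNat - 2 * (sbG N l r).toNat) 0 0
      (PySem.List.pyRange 0 (PySem.Int.floordiv N 2) 1)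
      (by omega)
      (fun _ => hcap')
    rw [heq, if_pos rfl, zero_add]
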